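-- pv_equiv track=rewrite | github.com/w4rum/cryptopals | mt19937.py | inverseLeftShiftBitmaskXor
-- ===== SOURCE A (Python) =====
-- w = 32
--
-- def inverseLeftShiftBitmaskXor(x, shift, mask):
--     # same method as inverseRightShiftXor but with a mask for the part
--     partIndex = 1
--     while (partIndex * shift < w):
--         partMask = (1 << shift) - 1
--         partMaskShift = shift*(partIndex)
--         partMask <<= partMaskShift
--
--         part = (x << shift) & partMask & mask
--         x ^= part
--         partIndex += 1
--     return x
-- ===== SOURCE B (Python) =====
-- w = 32
--
-- def inverseLeftShiftBitmaskXor(x, shift, mask):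
--     # Fixed-point iteration: keep the tempered value y and re-apply the
--     # tempering feedback to the current guess; each pass settles the next
--     # shift-wide block of bits, so the iteration reaches its fixed point
--     # (the untempered value) in at most w passes; stop as soon as it does.
--     y = x
--     for _ in range(w):
--         nx = y ^ ((x << shift) & mask)
--         if nx == x:
--             break
--         x = nx
--     return x
-- ===== Notes on version B (the rewrite author's own statement) =====
-- stated objective: alternative
-- what changed: B replaces A's explicit construction and sweep of per-block part masks (partMask/partIndex bookkeeping) by a plain fixed-point iteration x = y ^ ((x << shift) & mask) run a fixed w=32 times, with no masks or indices maintained.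
-- outside the precondition, e.g. on inverseLeftShiftBitmaskXor(1, 1, -1): A returns 4294967295, B returns 8589934591; on inverseLeftShiftBitmaskXor(1, 0, 7): A does not finish within the time limit, B returns 1; on inverseLeftShiftBitmaskXor(1, -1, 7): A raises ValueError, B raises ValueError
import Mathlib
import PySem

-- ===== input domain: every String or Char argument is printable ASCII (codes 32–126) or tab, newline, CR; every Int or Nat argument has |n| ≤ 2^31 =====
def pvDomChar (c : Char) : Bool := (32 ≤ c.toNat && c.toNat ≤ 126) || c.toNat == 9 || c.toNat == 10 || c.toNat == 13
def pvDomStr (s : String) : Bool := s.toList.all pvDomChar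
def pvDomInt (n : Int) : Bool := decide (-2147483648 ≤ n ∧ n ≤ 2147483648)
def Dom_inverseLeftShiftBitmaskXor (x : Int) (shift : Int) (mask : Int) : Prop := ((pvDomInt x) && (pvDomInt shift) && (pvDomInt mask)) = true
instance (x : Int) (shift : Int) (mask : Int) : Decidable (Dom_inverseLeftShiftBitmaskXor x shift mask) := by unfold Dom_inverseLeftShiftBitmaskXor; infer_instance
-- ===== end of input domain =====

-- B inverts the MT19937 left-shift-mask-xor tempering by a fixed-point iteration on the
-- whole word instead of A's per-block part-mask sweep (alternative algorithm, same cost).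

-- ===== PORT A =====
-- Python's while loop, with a fuel argument only to make it total: under Pre_ (1 ≤ shift)
-- partIndex stays below 32 while the guard holds, so fuel 32 is never exhausted.
-- `shift.toNat` / `(shift * partIndex).toNat` are exact for the nonnegative shifts Pre_ admits.
def pvLoopA (shift mask : Int) : Nat → Int → Int → Int
  | 0, _, x => x
  | fuel+1, partIndex, x =>
    if partIndex * shift < 32 then
      let partMask : Int := ((1 : Int) <<< shift.toNat) - 1
      let partMask2 : Int := partMask <<< (shift * partIndex).toNat
      let part : Int := PySem.Int.band (PySem.Int.band (x <<< shift.toNat) partMask2) mask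
      pvLoopA shift mask fuel (partIndex + 1) (PySem.Int.bxor x part)
    else x

def inverseLeftShiftBitmaskXor (x : Int) (shift : Int) (mask : Int) : Int :=
  pvLoopA shift mask 32 1 x

-- ===== PORT B =====
-- Python's `for _ in range(w)` over the fuel 32, with the early break when the fixed
-- point is reached (`if nx == x: break`).
def pvLoopB (y shift mask : Int) : Nat → Int → Int
  | 0, x => x
  | fuel+1, x =>
    let nx := PySem.Int.bxor y (PySem.Int.band (x <<< shift.toNat) mask)
    if nx = x then x else pvLoopB y shift mask fuel nx

def inverseLeftShiftBitmaskXor_alt (x : Int) (shift : Int) (mask : Int) : Int :=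
  pvLoopB x shift mask 32 x

-- ===== PRECONDITION & SPEC =====
-- Pre_ excludes shift ≤ 0, where A never returns (ValueError on `1 << shift` for negative
-- shift, an infinite loop for shift = 0), and negative masks, on which A and B differ:
-- for a sign-extended (negative) mask A's sweep only ever corrects bits below 32 + shift
-- while B's fixed point propagates through all set mask bits — both values are accidental
-- for a mask outside the 32-bit domain this MT19937 tempering helper is meant for.
def Pre_inverseLeftShiftBitmaskXor (x : Int) (shift : Int) (mask : Int) : Prop :=
  1 ≤ shift ∧ 0 ≤ mask
instance (x : Int) (shift : Int) (mask : Int) : Decidable (Pre_inverseLeftShiftBitmaskXor x shift mask) := by unfold Pre_inverseLeftShiftBitmaskXor; infer_instance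

def pvWitness_inverseLeftShiftBitmaskXor : Int × Int × Int := (123456789, 7, 181)

def Spec_inverseLeftShiftBitmaskXor (x : Int) (shift : Int) (mask : Int) (out : Int) : Prop := out = inverseLeftShiftBitmaskXor_alt x shift mask
instance (x : Int) (shift : Int) (mask : Int) (out : Int) : Decidable (Spec_inverseLeftShiftBitmaskXor x shift mask out) := by unfold Spec_inverseLeftShiftBitmaskXor; infer_instance

-- ===== CLAIM (what is proved, stated in full; the proofs are below) =====
def Claim_equal_inverseLeftShiftBitmaskXor : Prop := ∀ (x : Int) (shift : Int) (mask : Int), Dom_inverseLeftShiftBitmaskXor x shift mask → Pre_inverseLeftShiftBitmaskXor x shift mask → Spec_inverseLeftShiftBitmaskXor x shift mask (inverseLeftShiftBitmaskXor x shift mask)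

-- ===== LEMMAS AND PROOFS =====

-- Two's-complement bit i of the infinite-precision integer a.
def pvBit (a : Int) (i : Nat) : Bool :=
  if 0 ≤ a then a.toNat.testBit i else !((-a-1).toNat.testBit i)

theorem pvBit_natCast (k i : Nat) : pvBit (↑k) i = k.testBit i := by
  simp [pvBit]

theorem pvBit_nonneg {a : Int} (h : 0 ≤ a) (i : Nat) : pvBit a i = a.toNat.testBit i := by
  simp [pvBit, h]

theorem pvBit_neg {a : Int} (h : ¬ 0 ≤ a) (i : Nat) : pvBit a i = !((-a-1).toNat.testBit i) := by
  simp [pvBit, h]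

theorem pvBit_negForm (k : Nat) (i : Nat) : pvBit (-(↑k:Int) - 1) i = !(k.testBit i) := by
  have h : ¬ (0:Int) ≤ -(↑k:Int) - 1 := by omega
  have h3 : ((-(-(↑k:Int) - 1) - 1)).toNat = k := by omega
  rw [pvBit_neg h, h3]

theorem pvBit_ext {a b : Int} (h : ∀ i, pvBit a i = pvBit b i) : a = b := by
  by_cases ha : 0 ≤ a <;> by_cases hb : 0 ≤ b
  · have : a.toNat = b.toNat := by
      apply Nat.eq_of_testBit_eq; intro i
      have := h i; rwa [pvBit_nonneg ha, pvBit_nonneg hb] at this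
    omega
  · exfalso
    have hi := h (a.toNat + (-b-1).toNat)
    rw [pvBit_nonneg ha, pvBit_neg hb] at hi
    rw [Nat.testBit_lt_two_pow, Nat.testBit_lt_two_pow] at hi
    · simp at hi
    · calc (-b-1).toNat < 2 ^ ((-b-1).toNat) := Nat.lt_two_pow_self
        _ ≤ 2 ^ (a.toNat + (-b-1).toNat) := Nat.pow_le_pow_right (by norm_num) (by omega)
    · calc a.toNat < 2 ^ (a.toNat) := Nat.lt_two_pow_self
        _ ≤ 2 ^ (a.toNat + (-b-1).toNat) := Nat.pow_le_pow_right (by norm_num) (by omega)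
  · exfalso
    have hi := h (b.toNat + (-a-1).toNat)
    rw [pvBit_neg ha, pvBit_nonneg hb] at hi
    rw [Nat.testBit_lt_two_pow, Nat.testBit_lt_two_pow] at hi
    · simp at hi
    · calc b.toNat < 2 ^ (b.toNat) := Nat.lt_two_pow_self
        _ ≤ 2 ^ (b.toNat + (-a-1).toNat) := Nat.pow_le_pow_right (by norm_num) (by omega)
    · calc (-a-1).toNat < 2 ^ ((-a-1).toNat) := Nat.lt_two_pow_self
        _ ≤ 2 ^ (b.toNat + (-a-1).toNat) := Nat.pow_le_pow_right (by norm_num) (by omega)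
  · have : (-a-1).toNat = (-b-1).toNat := by
      apply Nat.eq_of_testBit_eq; intro i
      have := h i; rw [pvBit_neg ha, pvBit_neg hb] at this
      simpa using this
    omega

theorem pvBit_bxor (a b : Int) (i : Nat) :
    pvBit (PySem.Int.bxor a b) i = (pvBit a i ^^ pvBit b i) := by
  by_cases ha : 0 ≤ a <;> by_cases hb : 0 ≤ b
  · have hv : PySem.Int.bxor a b = ((a.toNat ^^^ b.toNat : Nat) : Int) := by
      simp [PySem.Int.bxor, ha, hb]
    rw [hv, pvBit_natCast, pvBit_nonneg ha, pvBit_nonneg hb, Nat.testBit_xor]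
  · have hv : PySem.Int.bxor a b = -((a.toNat ^^^ (-b-1).toNat : Nat) : Int) - 1 := by
      simp [PySem.Int.bxor, ha, hb]
    rw [hv, pvBit_negForm, pvBit_nonneg ha, pvBit_neg hb, Nat.testBit_xor]
    cases a.toNat.testBit i <;> cases (-b-1).toNat.testBit i <;> rfl
  · have hv : PySem.Int.bxor a b = -(((-a-1).toNat ^^^ b.toNat : Nat) : Int) - 1 := by
      simp [PySem.Int.bxor, ha, hb]
    rw [hv, pvBit_negForm, pvBit_neg ha, pvBit_nonneg hb, Nat.testBit_xor]
    cases (-a-1).toNat.testBit i <;> cases b.toNat.testBit i <;> rfl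
  · have hv : PySem.Int.bxor a b = (((-a-1).toNat ^^^ (-b-1).toNat : Nat) : Int) := by
      simp [PySem.Int.bxor, ha, hb]
    rw [hv, pvBit_natCast, pvBit_neg ha, pvBit_neg hb, Nat.testBit_xor]
    cases (-a-1).toNat.testBit i <;> cases (-b-1).toNat.testBit i <;> rfl

-- xor decomposed into the low bit and the rest
theorem pvXorDecomp (a b : Nat) : a ^^^ b = 2*((a/2)^^^(b/2)) + (a%2 ^^^ b%2) := by
  have hc : (a%2 ^^^ b%2) < 2 := by
    rcases Nat.mod_two_eq_zero_or_one a with h|h <;> rcases Nat.mod_two_eq_zero_or_one b with h'|h' <;>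
      simp [h, h']
  apply Nat.eq_of_testBit_eq; intro j
  have h2 : 2*((a/2)^^^(b/2)) + (a%2^^^b%2) = 2^1 * ((a/2)^^^(b/2)) + (a%2^^^b%2) := by ring
  rw [h2, Nat.testBit_two_pow_mul_add _ (by simpa using hc)]
  cases j with
  | zero =>
    simp only [Nat.testBit_xor, if_pos (by norm_num : (0:Nat) < 1)]
    rcases Nat.mod_two_eq_zero_or_one a with h|h <;> rcases Nat.mod_two_eq_zero_or_one b with h'|h' <;>
      simp [Nat.testBit_zero, h, h']
  | succ j =>
    simp [Nat.testBit_xor, Nat.testBit_div_two]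

theorem pvSubAnd (x y : Nat) : x - (x &&& y) = x ^^^ (x &&& y) := by
  suffices H : ∀ x s : Nat, s &&& x = s → x - s = x ^^^ s by
    refine H x (x &&& y) ?_
    apply Nat.eq_of_testBit_eq; intro i
    simp only [Nat.testBit_and]
    cases x.testBit i <;> cases y.testBit i <;> rfl
  intro x
  induction x using Nat.strong_induction_on with
  | _ x ih =>
    intro s hs
    by_cases hx : x = 0
    · subst hx
      have : s = 0 := by simpa using hs.symm
      simp [this]
    · have hdiv : (s/2) &&& (x/2) = s/2 := by
        apply Nat.eq_of_testBit_eq; intro i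
        have h := congrArg (fun t => t.testBit (i+1)) hs
        simpa [Nat.testBit_and, Nat.testBit_div_two] using h
      have hlt : x/2 < x := Nat.div_lt_self (Nat.pos_of_ne_zero hx) (by norm_num)
      have IH := ih (x/2) hlt (s/2) hdiv
      have hble : s % 2 = 1 → x % 2 = 1 := by
        intro h1
        have hb := congrArg (fun t => t.testBit 0) hs
        simp only [Nat.testBit_and] at hb
        have hsb : s.testBit 0 = true := by
          simp [Nat.testBit_zero, h1]
        rw [hsb, Bool.true_and] at hb
        have hxb : x.testBit 0 = true := hb
        simpa [Nat.testBit_zero] using hxb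
      have hsle : s/2 ≤ x/2 := hdiv ▸ Nat.and_le_right
      have hxd := pvXorDecomp x s
      have hbit : x%2 ^^^ s%2 = x%2 - s%2 := by
        rcases Nat.mod_two_eq_zero_or_one x with h|h <;> rcases Nat.mod_two_eq_zero_or_one s with h'|h'
        · simp [h, h']
        · exfalso; have := hble h'; omega
        · simp [h, h']
        · simp [h, h']
      omega

theorem pvTestBitSubAnd (x y : Nat) (i : Nat) :
    (x - (x &&& y)).testBit i = (x.testBit i && !(y.testBit i)) := by
  rw [pvSubAnd]
  simp only [Nat.testBit_xor, Nat.testBit_and]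
  cases x.testBit i <;> cases y.testBit i <;> rfl

theorem pvBit_band (a b : Int) (i : Nat) :
    pvBit (PySem.Int.band a b) i = (pvBit a i && pvBit b i) := by
  by_cases ha : 0 ≤ a <;> by_cases hb : 0 ≤ b
  · have hv : PySem.Int.band a b = ((a.toNat &&& b.toNat : Nat) : Int) := by
      simp [PySem.Int.band, ha, hb]
    rw [hv, pvBit_natCast, pvBit_nonneg ha, pvBit_nonneg hb, Nat.testBit_and]
  · have hv : PySem.Int.band a b = ((a.toNat - (a.toNat &&& (-b-1).toNat) : Nat) : Int) := by
      simp [PySem.Int.band, ha, hb]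
    rw [hv, pvBit_natCast, pvBit_nonneg ha, pvBit_neg hb, pvTestBitSubAnd]
  · have hv : PySem.Int.band a b = ((b.toNat - (b.toNat &&& (-a-1).toNat) : Nat) : Int) := by
      simp [PySem.Int.band, ha, hb]
    rw [hv, pvBit_natCast, pvBit_neg ha, pvBit_nonneg hb, pvTestBitSubAnd]
    cases b.toNat.testBit i <;> cases (-a-1).toNat.testBit i <;> rfl
  · have hv : PySem.Int.band a b = -(((-a-1).toNat ||| (-b-1).toNat : Nat) : Int) - 1 := by
      simp [PySem.Int.band, ha, hb]
    rw [hv, pvBit_negForm, pvBit_neg ha, pvBit_neg hb, Nat.testBit_or]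
    cases (-a-1).toNat.testBit i <;> cases (-b-1).toNat.testBit i <;> rfl

theorem pvShlEq (a : Int) (n : Nat) : a <<< n = a * 2^n := by
  rw [← Int.shiftLeft_natCast_right, Int.shiftLeft_eq_mul_pow]
  push_cast; ring

theorem pvBit_shl (a : Int) (n i : Nat) :
    pvBit (a <<< n) i = (decide (n ≤ i) && pvBit a (i - n)) := by
  rw [pvShlEq]
  by_cases ha : 0 ≤ a
  · have hv : a * 2^n = ((a.toNat * 2^n : Nat) : Int) := by
      push_cast [Int.toNat_of_nonneg ha]; ring
    rw [hv, pvBit_natCast, Nat.testBit_mul_two_pow, pvBit_nonneg ha]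
  · have h2 : (0:Int) < 2^n := by positivity
    have hneg : ¬ 0 ≤ a * 2^n := by
      simp only [not_le] at ha ⊢
      exact mul_neg_of_neg_of_pos ha h2
    have h1 : 1 ≤ 2^n := Nat.one_le_two_pow
    have hc : (-a-1).toNat * 2^n + (2^n - 1) = ((-(a * 2^n)) - 1).toNat := by
      have hcast : ((((-a-1).toNat * 2^n + (2^n - 1) : Nat)) : Int) = -(a * 2^n) - 1 := by
        push_cast [Int.toNat_of_nonneg (by omega : (0:Int) ≤ -a-1), h1]
        ring
      omega
    rw [pvBit_neg hneg, pvBit_neg ha, ← hc]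
    have hr : (-a-1).toNat * 2^n + (2^n - 1) = 2^n * ((-a-1).toNat) + (2^n - 1) := by ring
    rw [hr, Nat.testBit_two_pow_mul_add _ (by omega)]
    by_cases hin : i < n
    · simp [hin, Nat.testBit_two_pow_sub_one, show ¬ n ≤ i by omega]
    · simp [hin, show n ≤ i by omega]

theorem pvBit_high {a : Int} (k i : Nat) (ha : 0 ≤ a) (hlt : a < 2^k) (hi : k ≤ i) :
    pvBit a i = false := by
  rw [pvBit_nonneg ha]
  apply Nat.testBit_lt_two_pow
  have hcast : ((2^k : Nat) : Int) = 2^k := by push_cast; rfl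
  have h1 : a.toNat < 2^k := by omega
  calc a.toNat < 2^k := h1
    _ ≤ 2^i := Nat.pow_le_pow_right (by norm_num) hi

-- A's loop: from a state whose processed low bits already satisfy the feedback equation
-- and whose high bits are untouched, the loop's result satisfies the feedback equation
-- at every bit (the fixed-point characterisation of A's output).
theorem pvLoopA_fix (n : Nat) (hn : 1 ≤ n) (M x0 : Int) (hM : 0 ≤ M) (hM32 : M < 2^32) :
    ∀ (fuel pI : Nat) (x : Int), 1 ≤ pI → 32 ≤ fuel + pI →
    (∀ i, n * pI ≤ i → pvBit x i = pvBit x0 i) →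
    (∀ i, i < n * pI → pvBit x i = (pvBit x0 i ^^ (decide (n ≤ i) && pvBit M i && pvBit x (i - n)))) →
    ∀ i, pvBit (pvLoopA (↑n) M fuel (↑pI) x) i
       = (pvBit x0 i ^^ (decide (n ≤ i) && pvBit M i && pvBit (pvLoopA (↑n) M fuel (↑pI) x) (i - n))) := by
  intro fuel
  induction fuel with
  | zero =>
    intro pI x h1 h32 Hhigh Hlow i
    simp only [pvLoopA]
    have hp : pI ≤ n * pI := by nlinarith
    by_cases hi : i < n * pI
    · exact Hlow i hi
    · have hMi : pvBit M i = false := pvBit_high 32 i hM hM32 (by omega)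
      rw [Hhigh i (by omega), hMi]
      simp
  | succ fuel ihf =>
    intro pI x h1 h32 Hhigh Hlow i
    by_cases hguard : ((↑pI : Int) * (↑n) < 32)
    · have hg : pI * n < 32 := by exact_mod_cast hguard
      have hcast1 : ((↑n : Int)).toNat = n := by omega
      have hcast2 : ((↑n : Int) * (↑pI : Int)).toNat = n * pI := by
        have : ((↑n : Int) * (↑pI : Int)) = ((n * pI : Nat) : Int) := by push_cast; ring
        rw [this]; omega
      have hnpI : n ≤ n * pI := by nlinarith
      -- the updated state
      set pm2 : Int := (((1:Int) <<< n) - 1) <<< (n * pI) with hpm2def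
      set part : Int := PySem.Int.band (PySem.Int.band (x <<< n) pm2) M with hpartdef
      set x' : Int := PySem.Int.bxor x part with hx'def
      have hunfold : pvLoopA (↑n) M (fuel+1) (↑pI) x = pvLoopA (↑n) M fuel (↑pI + 1) x' := by
        simp only [pvLoopA, if_pos hguard, hcast1, hcast2, hx'def, hpartdef, hpm2def]
      -- bit of the block mask
      have hpm1 : ((1:Int) <<< n) - 1 = ((2^n - 1 : Nat) : Int) := by
        rw [pvShlEq]
        push_cast [Nat.one_le_two_pow]
        ring
      have hpm : ∀ j, pvBit pm2 j = (decide (n*pI ≤ j) && decide (j - n*pI < n)) := by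
        intro j
        rw [hpm2def, pvBit_shl, hpm1, pvBit_natCast, Nat.testBit_two_pow_sub_one]
      -- bit of the updated state
      have hx' : ∀ j, pvBit x' j =
          (pvBit x j ^^ (((decide (n ≤ j) && pvBit x (j - n)) && (decide (n*pI ≤ j) && decide (j - n*pI < n))) && pvBit M j)) := by
        intro j
        rw [hx'def, pvBit_bxor, hpartdef, pvBit_band, pvBit_band, pvBit_shl, hpm j]
      have hmulsucc : n * (pI+1) = n * pI + n := by ring
      -- invariants for the next state
      have Hhigh' : ∀ i, n * (pI+1) ≤ i → pvBit x' i = pvBit x0 i := by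
        intro i hi
        rw [hx' i]
        have hnb : ¬ (i - n*pI < n) := by omega
        simp only [hnb, decide_false, Bool.and_false, Bool.false_and, Bool.xor_false]
        exact Hhigh i (by omega)
      have Hlow' : ∀ i, i < n * (pI+1) →
          pvBit x' i = (pvBit x0 i ^^ (decide (n ≤ i) && pvBit M i && pvBit x' (i - n))) := by
        intro i hi
        by_cases hblock : n * pI ≤ i
        · -- inside the current block
          have hni : n ≤ i := by omega
          have hxi : pvBit x' i = (pvBit x i ^^ (pvBit x (i - n) && pvBit M i)) := by
            rw [hx' i]
            simp [hni, hblock, show i - n*pI < n by omega]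
          have hlo : pvBit x' (i - n) = pvBit x (i - n) := by
            rw [hx' (i - n)]
            simp [show ¬ (n*pI ≤ i - n) by omega]
          rw [hxi, hlo, Hhigh i hblock]
          simp only [hni, decide_true, Bool.true_and]
          cases pvBit M i <;> cases pvBit x (i - n) <;> rfl
        · -- strictly below the current block
          have hxi : pvBit x' i = pvBit x i := by
            rw [hx' i]
            simp [show ¬ (n*pI ≤ i) from hblock]
          have hlo : pvBit x' (i - n) = pvBit x (i - n) := by
            rw [hx' (i - n)]
            simp [show ¬ (n*pI ≤ i - n) by omega]
          rw [hxi, hlo]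
          exact Hlow i (by omega)
      have hrec := ihf (pI+1) x' (by omega) (by omega) Hhigh' Hlow' i
      rw [hunfold]
      have hc3 : ((↑(pI+1) : Int)) = (↑pI : Int) + 1 := by push_cast; ring
      rw [hc3] at hrec
      exact hrec
    · -- loop exits
      have hg : 32 ≤ pI * n := by
        by_contra hcon
        exact hguard (by exact_mod_cast (by omega : (pI * n : Nat) < 32))
      have hg2 : 32 ≤ n * pI := by rwa [Nat.mul_comm] at hg
      simp only [pvLoopA, if_neg hguard]
      by_cases hi : i < n * pI
      · exact Hlow i hi
      · have hMi : pvBit M i = false := pvBit_high 32 i hM hM32 (by omega)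
        rw [Hhigh i (by omega), hMi]
        simp
    
-- B's loop with early break computes the plain 32-fold iteration
theorem pvLoopB_eq_iterate (y s m : Int) :
    ∀ (fuel : Nat) (x : Int), pvLoopB y s m fuel x =
      (fun v => PySem.Int.bxor y (PySem.Int.band (v <<< s.toNat) m))^[fuel] x := by
  intro fuel
  induction fuel with
  | zero => intro x; simp [pvLoopB]
  | succ fuel ih =>
    intro x
    simp only [pvLoopB]
    by_cases h : PySem.Int.bxor y (PySem.Int.band (x <<< s.toNat) m) = x
    · rw [if_pos h, Function.iterate_succ_apply]
      simp only [h]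
      exact (Function.iterate_fixed h fuel).symm
    · rw [if_neg h, ih, Function.iterate_succ_apply]

-- the iterates of B's step agree with any solution z of the feedback equation on
-- ever-larger low blocks of bits
theorem pvIterB_agree (n : Nat) (M x0 z : Int)
    (hz : ∀ i, pvBit z i = (pvBit x0 i ^^ (decide (n ≤ i) && pvBit M i && pvBit z (i - n)))) :
    ∀ (k : Nat) (i : Nat), i < n * (k+1) →
      pvBit ((fun v => PySem.Int.bxor x0 (PySem.Int.band (v <<< n) M))^[k] x0) i = pvBit z i := by
  intro k
  induction k with
  | zero =>
    intro i hi
    simp only [Function.iterate_zero, id]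
    rw [hz i]
    simp [show ¬ n ≤ i by omega]
  | succ k ih =>
    intro i hi
    rw [Function.iterate_succ_apply']
    have hb : pvBit (PySem.Int.bxor x0
        (PySem.Int.band (((fun v => PySem.Int.bxor x0 (PySem.Int.band (v <<< n) M))^[k] x0) <<< n) M)) i
        = (pvBit x0 i ^^ ((decide (n ≤ i) && pvBit ((fun v => PySem.Int.bxor x0 (PySem.Int.band (v <<< n) M))^[k] x0) (i - n)) && pvBit M i)) := by
      rw [pvBit_bxor, pvBit_band, pvBit_shl]
    by_cases hni : n ≤ i
    · have hm : n * (k+1+1) = n * (k+1) + n := by ring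
      have hihn := ih (i - n) (by omega)
      rw [hb, hihn, hz i]
      cases pvBit M i <;> cases pvBit z (i - n) <;> simp [hni]
    · rw [hb, hz i]
      simp [hni]

-- ===== VERDICT (by name: the statement is the Claim_ definition above) =====
theorem inverseLeftShiftBitmaskXor_spec : Claim_equal_inverseLeftShiftBitmaskXor := by
  unfold Claim_equal_inverseLeftShiftBitmaskXor
  intro x shift mask hdom hpre
  obtain ⟨hs, hm⟩ := hpre
  unfold Spec_inverseLeftShiftBitmaskXor
  have hdm : mask ≤ 2147483648 := by
    unfold Dom_inverseLeftShiftBitmaskXor pvDomInt at hdom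
    simp only [Bool.and_eq_true, decide_eq_true_eq] at hdom
    exact hdom.2.2
  have hM32 : mask < 2^32 := by
    have : (2:Int)^32 = 4294967296 := by norm_num
    omega
  set n := shift.toNat with hndef
  have hn1 : 1 ≤ n := by omega
  have hsn : shift = (↑n : Int) := by omega
  rw [hsn]
  unfold inverseLeftShiftBitmaskXor inverseLeftShiftBitmaskXor_alt
  have hz := pvLoopA_fix n hn1 mask x hm hM32 32 1 x (le_refl 1) (by omega)
    (fun i _ => rfl)
    (fun i hi => by simp [show ¬ n ≤ i by omega])
  simp only [Nat.cast_one] at hz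
  rw [pvLoopB_eq_iterate]
  have hcast1 : ((↑n : Int)).toNat = n := by omega
  rw [hcast1]
  apply pvBit_ext
  intro i
  by_cases hi : i < n * 33
  · exact (pvIterB_agree n mask x _ hz 32 i (by omega)).symm
  · have h33 : 33 ≤ n * 33 := by nlinarith
    have hMi : pvBit mask i = false := pvBit_high 32 i hm hM32 (by omega)
    rw [hz i, hMi]
    rw [show (32:Nat) = 31 + 1 from rfl, Function.iterate_succ_apply']
    rw [pvBit_bxor, pvBit_band, pvBit_shl, hMi]
    simp
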